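-- pv_equiv track=rewrite | github.com/tomorrowdevs-projects/programming-basics | projects/workshops/coding challenge/kata.py | common
-- ===== SOURCE A (Python) =====
-- def common(a, b, c):
--
--     sum = 0
--     # sort arrays to have at position 0 lower number
--     a.sort()
--     b.sort()
--     c.sort()
--
--     # check if in position 0 we have the same number in all three arrays and sum it,
--     # otherwise we pop the lower number from his array
--     while True:
--         if a[0] == b[0] == c[0]:
--             sum += a[0]
--             a.pop(0)
--             b.pop(0)
--             c.pop(0)
--         elif a[0] <= b[0] and a[0] <= c[0]:
--             a.pop(0)
--         elif b[0] <= a[0] and b[0] <= c[0]: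
--             b.pop(0)
--         elif c[0] <= a[0] and c[0] <= b[0]:
--             c.pop(0)
--
--         # when we reach at least one array without number exit
--         if len(a) == 0 or len(b) == 0 or len(c) == 0:
--             break
--
--     return sum
-- ===== SOURCE B (Python) =====
-- def common(a, b, c):
--     ca = {}
--     for x in a:
--         ca[x] = ca.get(x, 0) + 1
--     cb = {}
--     for x in b:
--         cb[x] = cb.get(x, 0) + 1
--     cc = {}
--     for x in c:
--         cc[x] = cc.get(x, 0) + 1
--     total = 0
--     for x in ca:
--         total += x * min(ca[x], cb.get(x, 0), cc.get(x, 0))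
--     return total
-- ===== Notes on version B (the rewrite author's own statement) =====
-- stated objective: faster
-- what changed: Replaces A's sort-then-pop(0) three-way merge loop (each pop(0) is O(n)) by hash-map frequency counters: B counts each list once and sums x*min(count_a,count_b,count_c) over the distinct elements of a, with no sorting and no list mutation.
import Mathlib
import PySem

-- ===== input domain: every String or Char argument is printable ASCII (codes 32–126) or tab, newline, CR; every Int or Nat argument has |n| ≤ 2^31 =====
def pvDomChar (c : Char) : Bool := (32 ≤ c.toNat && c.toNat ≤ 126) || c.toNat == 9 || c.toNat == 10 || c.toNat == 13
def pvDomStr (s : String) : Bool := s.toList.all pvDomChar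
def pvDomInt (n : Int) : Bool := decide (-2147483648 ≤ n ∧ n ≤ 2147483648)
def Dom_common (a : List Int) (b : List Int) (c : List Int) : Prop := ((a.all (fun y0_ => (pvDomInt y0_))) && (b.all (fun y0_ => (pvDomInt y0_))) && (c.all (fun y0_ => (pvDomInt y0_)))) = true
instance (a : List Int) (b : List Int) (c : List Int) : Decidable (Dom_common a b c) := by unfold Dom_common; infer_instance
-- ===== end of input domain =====

-- B replaces A's sort + pop(0) merge loop by hash-map counters (faster; A mutates its
-- arguments in place — sorts and drains them — B does not; the equivalence proved here is
-- about the RETURN value only).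

-- ===== PORT A =====
-- A's while-True loop over the three sorted lists; pop(0) = taking the tail. In the final
-- `elif c[0]<=a[0] and c[0]<=b[0]` branch the guard always holds by totality of ≤ (otherwise
-- Python would loop without popping), so it is ported as the else branch.
def commonLoop : List Int → List Int → List Int → Int → Int
  | x :: as, y :: bs, z :: cs, s =>
    if x = y ∧ y = z then
      if as.length = 0 ∨ bs.length = 0 ∨ cs.length = 0 then s + x
      else commonLoop as bs cs (s + x)
    else if x ≤ y ∧ x ≤ z then
      if as.length = 0 ∨ (y :: bs).length = 0 ∨ (z :: cs).length = 0 then s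
      else commonLoop as (y :: bs) (z :: cs) s
    else if y ≤ x ∧ y ≤ z then
      if (x :: as).length = 0 ∨ bs.length = 0 ∨ (z :: cs).length = 0 then s
      else commonLoop (x :: as) bs (z :: cs) s
    else
      if (x :: as).length = 0 ∨ (y :: bs).length = 0 ∨ cs.length = 0 then s
      else commonLoop (x :: as) (y :: bs) cs s
  | _, _, _, s => s  -- a[0] on an empty list: IndexError in Python, excluded by Pre_common
termination_by a b c _ => a.length + b.length + c.length
decreasing_by all_goals (simp only [List.length_cons]; omega)

def common (a : List Int) (b : List Int) (c : List Int) : Int :=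
  commonLoop (PySem.List.sorted a (fun v => v) false)
    (PySem.List.sorted b (fun v => v) false)
    (PySem.List.sorted c (fun v => v) false) 0

-- ===== PORT B =====
-- `for x in xs: d[x] = d.get(x, 0) + 1`
def buildCounter (xs : List Int) : PySem.Dict Int Int :=
  xs.foldl (fun d x => d.insert x (d.getD x 0 + 1)) PySem.Dict.empty

def common_alt (a : List Int) (b : List Int) (c : List Int) : Int :=
  let ca := buildCounter a
  let cb := buildCounter b
  let cc := buildCounter c
  -- `for x in ca: total += x * min(ca[x], cb.get(x, 0), cc.get(x, 0))`
  -- ca[x] with x a key of ca is ported as getD x 0 (the key is present, so no KeyError)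
  ca.keys.foldl
    (fun total x => total + x * min (ca.getD x 0) (min (cb.getD x 0) (cc.getD x 0))) 0

-- ===== PRECONDITION & SPEC =====
-- Pre_ excludes exactly the inputs on which A raises IndexError (some list empty).
def Pre_common (a : List Int) (b : List Int) (c : List Int) : Prop := a ≠ [] ∧ b ≠ [] ∧ c ≠ []
instance (a : List Int) (b : List Int) (c : List Int) : Decidable (Pre_common a b c) := by
  unfold Pre_common; infer_instance
def pvWitness_common : List Int × List Int × List Int := ([1, 2], [2, 3], [2, 4])

def Spec_common (a : List Int) (b : List Int) (c : List Int) (out : Int) : Prop := out = common_alt a b c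
instance (a : List Int) (b : List Int) (c : List Int) (out : Int) : Decidable (Spec_common a b c out) := by unfold Spec_common; infer_instance

-- ===== CLAIM (what is proved, stated in full; the proofs are below) =====
def Claim_equal_common : Prop := ∀ (a : List Int) (b : List Int) (c : List Int), Dom_common a b c → Pre_common a b c → Spec_common a b c (common a b c)

-- ===== LEMMAS AND PROOFS =====

-- min of the three multiplicities of x, and the "common sum" both programs compute
def m3 (a b c : List Int) (x : Int) : Nat :=
  min (a.count x) (min (b.count x) (c.count x))

def S (a b c : List Int) : Int := ∑ x ∈ a.toFinset, x * (m3 a b c x : Int)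

lemma S_nil_left (b c : List Int) : S [] b c = 0 := by simp [S]

lemma S_nil_mid (a c : List Int) : S a [] c = 0 := by
  simp [S, m3]

lemma S_nil_right (a b : List Int) : S a b [] = 0 := by
  simp [S, m3]

lemma not_mem_of_lt_head {v y : Int} {bs : List Int}
    (hp : (y :: bs).Pairwise (· ≤ ·)) (h : v < y) : v ∉ (y :: bs) := by
  intro hm
  rcases List.mem_cons.mp hm with rfl | hm
  · omega
  · exact absurd ((List.pairwise_cons.mp hp).1 v hm) (by omega)

-- dropping the head of the first list when it is absent from b or from c
lemma S_drop_left {v : Int} {b c : List Int} (as : List Int)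
    (h : b.count v = 0 ∨ c.count v = 0) : S (v :: as) b c = S as b c := by
  have hz : ∀ x, x = v → (x * (m3 (v :: as) b c x : Int) = 0 ∧ x * (m3 as b c x : Int) = 0) := by
    intro x hx; subst hx
    rcases h with h | h <;> constructor <;> simp [m3, h]
  have hstep : ∀ x ∈ insert v as.toFinset,
      x * (m3 (v :: as) b c x : Int) = x * (m3 as b c x : Int) := by
    intro x _
    by_cases hx : x = v
    · rw [(hz x hx).1, (hz x hx).2]
    · simp [m3, Ne.symm hx]
  have h1 : S (v :: as) b c = ∑ x ∈ insert v as.toFinset, x * (m3 as b c x : Int) := by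
    simpa [S, List.toFinset_cons] using
      Finset.sum_congr rfl hstep
  rw [h1]
  by_cases hv : v ∈ as.toFinset
  · rw [Finset.insert_eq_self.mpr hv]; rfl
  · rw [Finset.sum_insert hv, (hz v rfl).2, zero_add]; rfl

-- dropping the head of the second list when it is absent from a or from c
lemma S_drop_mid {v : Int} {a c : List Int} (bs : List Int)
    (h : a.count v = 0 ∨ c.count v = 0) : S a (v :: bs) c = S a bs c := by
  apply Finset.sum_congr rfl
  intro x hx
  by_cases hxv : x = v
  · subst hxv
    rcases h with h | h
    · exact absurd (List.mem_toFinset.mp hx) (List.count_eq_zero.mp h)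
    · simp [m3, h]
  · simp [m3, Ne.symm hxv]

-- dropping the head of the third list when it is absent from a or from b
lemma S_drop_right {v : Int} {a b : List Int} (cs : List Int)
    (h : a.count v = 0 ∨ b.count v = 0) : S a b (v :: cs) = S a b cs := by
  apply Finset.sum_congr rfl
  intro x hx
  by_cases hxv : x = v
  · subst hxv
    rcases h with h | h
    · exact absurd (List.mem_toFinset.mp hx) (List.count_eq_zero.mp h)
    · simp [m3, h]
  · simp [m3, Ne.symm hxv]

lemma S_cons_eq (v : Int) (as bs cs : List Int) :
    S (v :: as) (v :: bs) (v :: cs) = v + S as bs cs := by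
  have hstep : ∀ x ∈ insert v as.toFinset,
      x * (m3 (v :: as) (v :: bs) (v :: cs) x : Int)
        = x * (m3 as bs cs x : Int) + (if x = v then v else 0) := by
    intro x _
    by_cases hx : x = v
    · subst hx
      have : m3 (x :: as) (x :: bs) (x :: cs) x = m3 as bs cs x + 1 := by
        simp [m3]
      rw [this, if_pos rfl]; push_cast; ring
    · rw [if_neg hx]; simp [m3, Ne.symm hx]
  have h1 : S (v :: as) (v :: bs) (v :: cs)
      = (∑ x ∈ insert v as.toFinset, x * (m3 as bs cs x : Int))
        + (∑ x ∈ insert v as.toFinset, (if x = v then v else 0)) := by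
    rw [S, List.toFinset_cons, Finset.sum_congr rfl hstep, Finset.sum_add_distrib]
  have h2 : (∑ x ∈ insert v as.toFinset, (if x = v then v else 0)) = v := by
    rw [Finset.sum_ite_eq' (insert v as.toFinset) v (fun _ => v)]
    simp
  rw [h1, h2]
  by_cases hv : v ∈ as.toFinset
  · rw [Finset.insert_eq_self.mpr hv]; rw [S]; ring
  · rw [Finset.sum_insert hv]
    have : m3 as bs cs v = 0 := by
      have := List.count_eq_zero.mpr (fun hm => hv (List.mem_toFinset.mpr hm))
      simp [m3, this]
    rw [this]; rw [S]; push_cast; ring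

lemma pairwise_tail {x : Int} {l : List Int} (h : (x :: l).Pairwise (· ≤ ·)) :
    l.Pairwise (· ≤ ·) := (List.pairwise_cons.mp h).2

lemma count_zero_of_lt_head {v y : Int} {bs : List Int}
    (hp : (y :: bs).Pairwise (· ≤ ·)) (h : v < y) : (y :: bs).count v = 0 :=
  List.count_eq_zero.mpr (not_mem_of_lt_head hp h)

lemma nil_of_len_zero {l : List Int} (h : l.length = 0) : l = [] :=
  List.length_eq_zero_iff.mp h

-- A's merge loop on sorted lists computes s + S
lemma commonLoop_eq (n : Nat) : ∀ (a b c : List Int) (s : Int),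
    a.length + b.length + c.length = n →
    a.Pairwise (· ≤ ·) → b.Pairwise (· ≤ ·) → c.Pairwise (· ≤ ·) →
    commonLoop a b c s = s + S a b c := by
  induction n using Nat.strong_induction_on with
  | _ n IH =>
    intro a b c s hn ha hb hc
    match a, b, c with
    | [], b, c => simp [commonLoop.eq_def, S_nil_left]
    | x :: as, [], c => simp [commonLoop.eq_def, S_nil_mid]
    | x :: as, y :: bs, [] => simp [commonLoop.eq_def, S_nil_right]
    | x :: as, y :: bs, z :: cs =>
      rw [commonLoop]
      by_cases h1 : x = y ∧ y = z
      · obtain ⟨rfl, rfl⟩ := h1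
        rw [if_pos ⟨rfl, rfl⟩, S_cons_eq]
        split_ifs with hbr
        · have hS : S as bs cs = 0 := by
            rcases hbr with h | h | h
            · rw [nil_of_len_zero h, S_nil_left]
            · rw [nil_of_len_zero h, S_nil_mid]
            · rw [nil_of_len_zero h, S_nil_right]
          rw [hS]; ring
        · rw [IH (as.length + bs.length + cs.length) (by simp at hn; omega) as bs cs (s + x)
            rfl (pairwise_tail ha) (pairwise_tail hb) (pairwise_tail hc)]
          ring
      · rw [if_neg h1]
        by_cases h2 : x ≤ y ∧ x ≤ z
        · rw [if_pos h2]
          have hlt : x < y ∨ x < z := by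
            by_contra hco
            push_neg at hco
            exact h1 ⟨by omega, by omega⟩
          have hdrop : S (x :: as) (y :: bs) (z :: cs) = S as (y :: bs) (z :: cs) := by
            apply S_drop_left
            rcases hlt with h | h
            · exact Or.inl (count_zero_of_lt_head hb h)
            · exact Or.inr (count_zero_of_lt_head hc h)
          rw [hdrop]
          split_ifs with hbr
          · have : as = [] := by
              rcases hbr with h | h | h
              · exact nil_of_len_zero h
              · simp at h
              · simp at h
            rw [this, S_nil_left]; ring
          · exact IH (as.length + (y :: bs).length + (z :: cs).length)
              (by simp at hn ⊢; omega) as (y :: bs) (z :: cs) s rfl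
              (pairwise_tail ha) hb hc
        · rw [if_neg h2]
          by_cases h3 : y ≤ x ∧ y ≤ z
          · rw [if_pos h3]
            have hylt : y < x := by
              rcases h3 with ⟨hyx, hyz⟩
              by_contra hco
              push_neg at hco
              exact h2 ⟨by omega, by omega⟩
            have hdrop : S (x :: as) (y :: bs) (z :: cs) = S (x :: as) bs (z :: cs) :=
              S_drop_mid bs (Or.inl (count_zero_of_lt_head ha hylt))
            rw [hdrop]
            split_ifs with hbr
            · have : bs = [] := by
                rcases hbr with h | h | h
                · simp at h
                · exact nil_of_len_zero h
                · simp at h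
              rw [this, S_nil_mid]; ring
            · exact IH ((x :: as).length + bs.length + (z :: cs).length)
                (by simp at hn ⊢; omega) (x :: as) bs (z :: cs) s rfl
                ha (pairwise_tail hb) hc
          · rw [if_neg h3]
            have hzlt : z < x := by
              push_neg at h2 h3
              by_cases hxy : x ≤ y
              · have := h2 hxy; omega
              · push_neg at hxy
                have := h3 (by omega); omega
            have hdrop : S (x :: as) (y :: bs) (z :: cs) = S (x :: as) (y :: bs) cs :=
              S_drop_right cs (Or.inl (count_zero_of_lt_head ha hzlt))
            rw [hdrop]
            split_ifs with hbr
            · have : cs = [] := by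
                rcases hbr with h | h | h
                · simp at h
                · simp at h
                · exact nil_of_len_zero h
              rw [this, S_nil_right]; ring
            · exact IH ((x :: as).length + (y :: bs).length + cs.length)
                (by simp at hn ⊢; omega) (x :: as) (y :: bs) cs s rfl
                ha hb (pairwise_tail hc)

lemma S_perm {a a' b b' c c' : List Int}
    (hpa : a.Perm a') (hpb : b.Perm b') (hpc : c.Perm c') : S a b c = S a' b' c' := by
  rw [S, S, List.toFinset_eq_of_perm _ _ hpa]
  apply Finset.sum_congr rfl
  intro x _
  rw [m3, m3, hpa.count_eq, hpb.count_eq, hpc.count_eq]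

lemma common_eq_S (a b c : List Int) : common a b c = S a b c := by
  rw [common, commonLoop_eq _ _ _ _ 0 rfl
    (by simpa using PySem.List.sorted_pairwise (xs := a) (key := fun v => v))
    (by simpa using PySem.List.sorted_pairwise (xs := b) (key := fun v => v))
    (by simpa using PySem.List.sorted_pairwise (xs := c) (key := fun v => v)),
    zero_add]
  exact S_perm (PySem.List.sorted_perm _ _ _) (PySem.List.sorted_perm _ _ _)
    (PySem.List.sorted_perm _ _ _)

lemma buildCounter_eq (xs : List Int) : buildCounter xs = PySem.Dict.counter xs :=
  PySem.Dict.foldl_insert_getD_add_one_eq_counter xs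

lemma common_alt_eq_S (a b c : List Int) : common_alt a b c = S a b c := by
  rw [common_alt]
  simp only [buildCounter_eq, PySem.Dict.getD_counter, PySem.Dict.keys_counter]
  have hfold : ∀ (l : List Int) (t : Int),
      l.foldl (fun total x =>
        total + x * min ((a.count x : Int)) (min ((b.count x : Int)) ((c.count x : Int)))) t
      = t + (l.map (fun x => x * (m3 a b c x : Int))).sum := by
    intro l
    induction l with
    | nil => intro t; simp
    | cons h tl ih =>
      intro t
      rw [List.foldl_cons, ih, List.map_cons, List.sum_cons]
      have : min ((a.count h : Int)) (min ((b.count h : Int)) ((c.count h : Int)))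
          = (m3 a b c h : Int) := by
        rw [m3]; push_cast; rfl
      rw [this]; ring
  rw [hfold, zero_add, S]
  -- sum over the ordered-dedup list = sum over the finset of distinct elements
  have h1 : a.toFinset = (PySem.Set.ofList a : List Int).toFinset := by
    ext x; simp [PySem.Set.mem_ofList]
  rw [h1, List.sum_toFinset _ (PySem.Set.nodup_ofList a)]

-- ===== VERDICT (by name: the statement is the Claim_ definition above) =====
theorem common_spec : Claim_equal_common := by
  intro a b c _ _
  unfold Spec_common
  rw [common_eq_S, common_alt_eq_S]
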